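-- pv_equiv track=rewrite | github.com/casp24kom/bhp-platform-lab | app/snowflake_rag.py | _max_risk_tier
-- ===== SOURCE A (Python) =====
-- from typing import Any, Dict, List, Tuple
-- from typing import Any, Dict, List
--
-- def _max_risk_tier(chunks: List[Dict[str, Any]]) -> str:
--     order = {"LOW": 0, "MEDIUM": 1, "CRITICAL": 2}
--     best = "LOW"
--     for c in chunks or []:
--         t = (c.get("DOC_RISK_TIER") or "LOW").upper()
--         if t not in order:
--             t = "LOW"
--         if order[t] > order[best]:
--             best = t
--     return best
-- ===== SOURCE B (Python) =====
-- def _max_risk_tier(chunks):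
--     tiers = {(c.get("DOC_RISK_TIER") or "LOW").upper() for c in chunks or []}
--     if "CRITICAL" in tiers:
--         return "CRITICAL"
--     if "MEDIUM" in tiers:
--         return "MEDIUM"
--     return "LOW"
-- ===== Notes on version B (the rewrite author's own statement) =====
-- stated objective: idiomatic
-- what changed: Replaces the running-max accumulator with an order dict by a collect-then-query shape: build the set of normalized tier strings in one pass, then answer by priority membership checks (CRITICAL, then MEDIUM, else LOW); unknown tiers need no special-casing since they fail both checks.
import Mathlib
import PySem

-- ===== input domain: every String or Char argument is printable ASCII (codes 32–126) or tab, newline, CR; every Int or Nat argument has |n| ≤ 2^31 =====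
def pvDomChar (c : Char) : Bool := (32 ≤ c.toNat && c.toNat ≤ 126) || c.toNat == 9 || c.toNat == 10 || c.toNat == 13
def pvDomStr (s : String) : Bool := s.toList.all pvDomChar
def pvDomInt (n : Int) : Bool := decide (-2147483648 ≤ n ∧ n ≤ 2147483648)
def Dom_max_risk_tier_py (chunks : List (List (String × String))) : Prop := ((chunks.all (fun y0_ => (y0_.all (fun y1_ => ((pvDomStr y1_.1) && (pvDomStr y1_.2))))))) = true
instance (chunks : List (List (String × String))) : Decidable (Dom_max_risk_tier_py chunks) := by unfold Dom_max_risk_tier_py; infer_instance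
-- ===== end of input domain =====

-- B replaces A's running-max accumulator (with an order dict) by a collect-then-query shape:
-- build the set of normalized tier strings, then answer by priority membership checks (idiomatic).


-- shared subexpression of both programs: (c.get("DOC_RISK_TIER") or "LOW").upper()
def pvNorm (c : List (String × String)) : String :=
  let t0 := ((PySem.Dict.mk c).get? "DOC_RISK_TIER").getD ""
  PySem.Str.upper (if t0 = "" then "LOW" else t0)

-- ===== PORT A =====
def max_risk_tier_py (chunks : List (List (String × String))) : String :=
  let order : PySem.Dict String Int :=
    PySem.Dict.ofList [("LOW", 0), ("MEDIUM", 1), ("CRITICAL", 2)]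
  chunks.foldl (fun best c =>
    let t := pvNorm c
    let t := if order.contains t then t else "LOW"
    if order.getD t 0 > order.getD best 0 then t else best) "LOW"

-- ===== PORT B =====
def max_risk_tier_py_alt (chunks : List (List (String × String))) : String :=
  let tiers : PySem.Set String :=
    chunks.foldl (fun s c => PySem.Set.add s (pvNorm c)) PySem.Set.empty
  if PySem.Set.contains tiers "CRITICAL" then "CRITICAL"
  else if PySem.Set.contains tiers "MEDIUM" then "MEDIUM"
  else "LOW"

-- ===== PRECONDITION & SPEC =====
def Spec_max_risk_tier_py (chunks : List (List (String × String))) (out : String) : Prop := out = max_risk_tier_py_alt chunks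
instance (chunks : List (List (String × String))) (out : String) : Decidable (Spec_max_risk_tier_py chunks out) := by unfold Spec_max_risk_tier_py; infer_instance

-- ===== CLAIM (what is proved, stated in full; the proofs are below) =====
def Claim_equal_max_risk_tier_py : Prop := ∀ (chunks : List (List (String × String))), Dom_max_risk_tier_py chunks → Spec_max_risk_tier_py chunks (max_risk_tier_py chunks)

-- ===== LEMMAS AND PROOFS =====

-- A's loop body, with the `order` dict inlined (definitionally the lambda in the port)
def pvStepA (best : String) (c : List (String × String)) : String :=
  let order : PySem.Dict String Int :=
    PySem.Dict.ofList [("LOW", 0), ("MEDIUM", 1), ("CRITICAL", 2)]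
  let t := pvNorm c
  let t := if order.contains t then t else "LOW"
  if order.getD t 0 > order.getD best 0 then t else best

theorem portA_eq_foldl (chunks : List (List (String × String))) :
    max_risk_tier_py chunks = chunks.foldl pvStepA "LOW" := rfl

theorem ord_contains (t : String) :
    (PySem.Dict.ofList ([("LOW", (0:Int)), ("MEDIUM", 1), ("CRITICAL", 2)])).contains t
      = (t == "CRITICAL" || (t == "MEDIUM" || t == "LOW")) := by
  simp [PySem.Dict.ofList, PySem.Dict.update, PySem.Dict.contains_insert, PySem.Dict.contains_empty]

theorem ord_getD (t : String) :
    (PySem.Dict.ofList ([("LOW", (0:Int)), ("MEDIUM", 1), ("CRITICAL", 2)])).getD t 0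
      = if t = "CRITICAL" then 2 else if t = "MEDIUM" then 1 else 0 := by
  simp [PySem.Dict.ofList, PySem.Dict.update, PySem.Dict.getD_insert, PySem.Dict.getD_empty]

theorem stepA_char (best : String) (c : List (String × String)) :
    pvStepA best c =
      if pvNorm c = "CRITICAL" then "CRITICAL"
      else if pvNorm c = "MEDIUM" ∧ best ≠ "CRITICAL" then "MEDIUM"
      else best := by
  unfold pvStepA
  simp only [ord_contains, ord_getD]
  by_cases h1 : pvNorm c = "CRITICAL" <;> by_cases h2 : pvNorm c = "MEDIUM" <;>
    by_cases h3 : best = "CRITICAL" <;> by_cases h4 : best = "MEDIUM" <;>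
      simp_all

theorem foldA_char (l : List (List (String × String))) (b : String) :
    l.foldl pvStepA b =
    (if (∃ c ∈ l, pvNorm c = "CRITICAL") ∨ b = "CRITICAL" then "CRITICAL"
     else if (∃ c ∈ l, pvNorm c = "MEDIUM") ∨ b = "MEDIUM" then "MEDIUM" else b) := by
  induction l generalizing b with
  | nil => simp only [List.foldl_nil, List.not_mem_nil]; split_ifs <;> simp_all
  | cons c l ih =>
    rw [List.foldl_cons, stepA_char, ih]
    by_cases h1 : pvNorm c = "CRITICAL" <;> by_cases h2 : pvNorm c = "MEDIUM" <;>
      by_cases h3 : b = "CRITICAL" <;> by_cases h4 : b = "MEDIUM" <;>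
        simp_all

theorem tiers_eq (l : List (List (String × String))) :
    l.foldl (fun s c => PySem.Set.add s (pvNorm c)) PySem.Set.empty =
    PySem.Set.ofList (l.map pvNorm) := by
  rw [PySem.Set.ofList_eq_foldl, List.foldl_map]
  rfl

-- ===== VERDICT (by name: the statement is the Claim_ definition above) =====
theorem max_risk_tier_py_spec : Claim_equal_max_risk_tier_py := by
  intro chunks _
  unfold Spec_max_risk_tier_py max_risk_tier_py_alt
  rw [portA_eq_foldl, foldA_char, tiers_eq]
  simp only [PySem.Set.contains_iff, PySem.Set.mem_ofList, List.mem_map]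
  split_ifs <;> simp_all
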